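-- pv_equiv track=rewrite | github.com/Karna-Balaji-07/DSA_Sheet | .AAAAAAAAAAAAA/Sentence Similarity 3.py | solution
-- ===== SOURCE A (Python) =====
-- def solution(s1,s2):
--     word1 = s1.split()
--     word2 = s2.split()
--     len1 = len(word1)
--     len2 = len(word2)
--     if len1 < len2:
--         word1,word2 = word2,word1
--         len1,len2 = len2,len1
--
--     start = 0
--     end = 0
--     while start < len2 and word1[start] == word2[start]:
--         start += 1
--     while end < len2 and word1[len1-1-end] == word2[len2-1-end]:
--         end +=1
--
--     return start + end >= len2
-- ===== SOURCE B (Python) =====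
-- def solution(s1, s2):
--     w1 = s1.split()
--     w2 = s2.split()
--     if len(w1) < len(w2):
--         w1, w2 = w2, w1
--     n1, n2 = len(w1), len(w2)
--     return any(w2[:i] == w1[:i] and w2[i:] == w1[n1 - (n2 - i):]
--                for i in range(n2 + 1))
-- ===== Notes on version B (the rewrite author's own statement) =====
-- stated objective: alternative
-- what changed: Instead of computing maximal prefix- and suffix-match run lengths with two while loops and comparing their sum to len2, B enumerates every split point i of the shorter sentence and tests directly whether its prefix w2[:i] and suffix w2[i:] both match the corresponding slices of the longer sentence.
import Mathlib
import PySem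

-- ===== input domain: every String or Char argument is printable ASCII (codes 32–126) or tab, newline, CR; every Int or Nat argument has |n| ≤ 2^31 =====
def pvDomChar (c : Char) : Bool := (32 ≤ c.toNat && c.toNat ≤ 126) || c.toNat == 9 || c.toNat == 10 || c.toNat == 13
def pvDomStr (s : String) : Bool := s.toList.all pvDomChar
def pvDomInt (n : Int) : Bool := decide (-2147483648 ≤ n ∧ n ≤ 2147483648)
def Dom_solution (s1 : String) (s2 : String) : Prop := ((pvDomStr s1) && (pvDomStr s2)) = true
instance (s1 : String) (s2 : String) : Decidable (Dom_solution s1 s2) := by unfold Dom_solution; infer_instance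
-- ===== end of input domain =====

-- B: instead of A's two while loops counting maximal prefix/suffix matching runs, B tests
-- every split point of the shorter word list directly (alternative decomposition, same result).


-- ===== PORT A =====
-- 'while start < len2 and word1[start] == word2[start]: start += 1'
-- Indexing is ported with getD "" — exact, because the loop guard gives start < len2 ≤ len1,
-- so the Python index is always in range and never raises.
def prefWhile (w1 w2 : List String) (start : Nat) : Nat :=
  if start < w2.length then
    if w1.getD start "" == w2.getD start "" then prefWhile w1 w2 (start + 1) else start
  else start
termination_by w2.length - start

-- 'while end < len2 and word1[len1-1-end] == word2[len2-1-end]: end += 1'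
-- Guard gives end < len2 ≤ len1, so both Python indices are nonnegative and in range;
-- Nat subtraction here equals Python's int subtraction.
def sufWhile (w1 w2 : List String) (e : Nat) : Nat :=
  if e < w2.length then
    if w1.getD (w1.length - 1 - e) "" == w2.getD (w2.length - 1 - e) "" then
      sufWhile w1 w2 (e + 1)
    else e
  else e
termination_by w2.length - e

def solution (s1 : String) (s2 : String) : Bool :=
  let word1 := PySem.Str.split₀ s1
  let word2 := PySem.Str.split₀ s2
  let p := if word1.length < word2.length then (word2, word1) else (word1, word2)
  let start := prefWhile p.1 p.2 0
  let e := sufWhile p.1 p.2 0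
  decide (p.2.length ≤ start + e)

-- ===== PORT B =====
-- 'any(w2[:i] == w1[:i] and w2[i:] == w1[n1-(n2-i):] for i in range(n2+1))'
-- Slices are ported as take/drop — exact, because every slice bound used is in [0, len].
def solution_alt (s1 : String) (s2 : String) : Bool :=
  let a := PySem.Str.split₀ s1
  let b := PySem.Str.split₀ s2
  let p := if a.length < b.length then (b, a) else (a, b)
  let w1 := p.1
  let w2 := p.2
  let n1 := w1.length
  let n2 := w2.length
  (List.range (n2 + 1)).any fun i =>
    (w2.take i == w1.take i) && (w2.drop i == w1.drop (n1 - (n2 - i)))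

-- ===== PRECONDITION & SPEC =====
def Spec_solution (s1 : String) (s2 : String) (out : Bool) : Prop := out = solution_alt s1 s2
instance (s1 : String) (s2 : String) (out : Bool) : Decidable (Spec_solution s1 s2 out) := by unfold Spec_solution; infer_instance

-- ===== CLAIM (what is proved, stated in full; the proofs are below) =====
def Claim_equal_solution : Prop := ∀ (s1 : String) (s2 : String), Dom_solution s1 s2 → Spec_solution s1 s2 (solution s1 s2)

-- ===== LEMMAS AND PROOFS =====

-- prefix loop: returns the least index ≥ k at which the words differ (or w2.length)
theorem prefWhile_spec (w1 w2 : List String) (k : Nat) :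
    k ≤ w2.length →
    k ≤ prefWhile w1 w2 k ∧ prefWhile w1 w2 k ≤ w2.length ∧
    (∀ j, k ≤ j → j < prefWhile w1 w2 k → w1.getD j "" = w2.getD j "") ∧
    (prefWhile w1 w2 k < w2.length → w1.getD (prefWhile w1 w2 k) "" ≠ w2.getD (prefWhile w1 w2 k) "") := by
  induction k using prefWhile.induct w1 w2 with
  | case1 k hk heq ih =>
    intro hk0
    rw [prefWhile, if_pos hk, if_pos heq]
    obtain ⟨h1, h2, h3, h4⟩ := ih (by omega)
    refine ⟨by omega, h2, ?_, h4⟩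
    intro j hj hj2
    rcases Nat.eq_or_lt_of_le hj with h | h
    · exact h ▸ (beq_iff_eq.mp heq)
    · exact h3 j h hj2
  | case2 k hk hne =>
    intro hk0
    rw [prefWhile, if_pos hk, if_neg hne]
    exact ⟨le_refl _, le_of_lt hk, fun j hj hj2 => absurd hj (by omega),
      fun _ => by simpa using hne⟩
  | case3 k hk =>
    intro hk0
    rw [prefWhile, if_neg hk]
    exact ⟨le_refl _, by omega, fun j hj hj2 => absurd hj (by omega), fun h => absurd h hk⟩

-- suffix loop: counts matching words from the back
theorem sufWhile_spec (w1 w2 : List String) (k : Nat) :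
    k ≤ w2.length →
    k ≤ sufWhile w1 w2 k ∧ sufWhile w1 w2 k ≤ w2.length ∧
    (∀ j, k ≤ j → j < sufWhile w1 w2 k →
        w1.getD (w1.length - 1 - j) "" = w2.getD (w2.length - 1 - j) "") ∧
    (sufWhile w1 w2 k < w2.length →
        w1.getD (w1.length - 1 - sufWhile w1 w2 k) "" ≠ w2.getD (w2.length - 1 - sufWhile w1 w2 k) "") := by
  induction k using sufWhile.induct w1 w2 with
  | case1 k hk heq ih =>
    intro hk0
    rw [sufWhile, if_pos hk, if_pos heq]
    obtain ⟨h1, h2, h3, h4⟩ := ih (by omega)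
    refine ⟨by omega, h2, ?_, h4⟩
    intro j hj hj2
    rcases Nat.eq_or_lt_of_le hj with h | h
    · exact h ▸ (beq_iff_eq.mp heq)
    · exact h3 j h hj2
  | case2 k hk hne =>
    intro hk0
    rw [sufWhile, if_pos hk, if_neg hne]
    exact ⟨le_refl _, le_of_lt hk, fun j hj hj2 => absurd hj (by omega),
      fun _ => by simpa using hne⟩
  | case3 k hk =>
    intro hk0
    rw [sufWhile, if_neg hk]
    exact ⟨le_refl _, by omega, fun j hj hj2 => absurd hj (by omega), fun h => absurd h hk⟩

-- take equality characterized pointwise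
theorem take_eq_iff (w1 w2 : List String) (i : Nat) (hi : i ≤ w2.length) (hle : w2.length ≤ w1.length) :
    (w2.take i = w1.take i) ↔ ∀ j, j < i → w2.getD j "" = w1.getD j "" := by
  constructor
  · intro h j hj
    have h2 : j < w2.length := lt_of_lt_of_le hj hi
    have h1 : j < w1.length := lt_of_lt_of_le h2 hle
    have := congrArg (fun l => l.getD j "") h
    simpa [List.getD_eq_getElem?_getD, List.getElem?_take, hj, h2, h1,
      List.getElem?_eq_getElem] using this
  · intro h
    apply List.ext_getElem
    · simp; omega
    · intro j hj1 hj2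
      simp only [List.getElem_take]
      have hj : j < i := by simp [List.length_take] at hj1; omega
      have h2 : j < w2.length := lt_of_lt_of_le hj hi
      have h1 : j < w1.length := lt_of_lt_of_le h2 hle
      have := h j hj
      simpa [List.getD_eq_getElem?_getD, List.getElem?_eq_getElem, h1, h2] using this

-- drop equality characterized by back-distance pointwise
theorem drop_eq_iff (w1 w2 : List String) (i : Nat) (hi : i ≤ w2.length) (hle : w2.length ≤ w1.length) :
    (w2.drop i = w1.drop (w1.length - (w2.length - i))) ↔
      ∀ t, t < w2.length - i →
        w1.getD (w1.length - 1 - t) "" = w2.getD (w2.length - 1 - t) "" := by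
  constructor
  · intro h t ht
    have := congrArg (fun l => l.getD (w2.length - i - 1 - t) "") h
    have h2 : w2.length - 1 - t < w2.length := by omega
    have h1 : w1.length - 1 - t < w1.length := by omega
    have e2 : i + (w2.length - i - 1 - t) = w2.length - 1 - t := by omega
    have e1 : w1.length - (w2.length - i) + (w2.length - i - 1 - t) = w1.length - 1 - t := by omega
    simp only [List.getD_eq_getElem?_getD, List.getElem?_drop] at this
    rw [e2, e1] at this
    rw [List.getElem?_eq_getElem h2, List.getElem?_eq_getElem h1] at this
    simp only [List.getD_eq_getElem?_getD, List.getElem?_eq_getElem h2, List.getElem?_eq_getElem h1]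
    simpa using this.symm
  · intro h
    apply List.ext_getElem
    · simp; omega
    · intro j hj1 hj2
      have hj : j < w2.length - i := by simpa using hj1
      simp only [List.getElem_drop]
      have ht := h (w2.length - i - 1 - j) (by omega)
      have e2 : w2.length - 1 - (w2.length - i - 1 - j) = i + j := by omega
      have e1 : w1.length - 1 - (w2.length - i - 1 - j) = w1.length - (w2.length - i) + j := by omega
      rw [e2, e1] at ht
      have h2 : i + j < w2.length := by omega
      have h1 : w1.length - (w2.length - i) + j < w1.length := by omega
      simp only [List.getD_eq_getElem?_getD, List.getElem?_eq_getElem h2,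
        List.getElem?_eq_getElem h1, Option.getD_some] at ht
      exact ht.symm

-- core equivalence: run-length sum test = split-point enumeration
theorem core (w1 w2 : List String) (hle : w2.length ≤ w1.length) :
    decide (w2.length ≤ prefWhile w1 w2 0 + sufWhile w1 w2 0) =
      (List.range (w2.length + 1)).any (fun i =>
        (w2.take i == w1.take i) && (w2.drop i == w1.drop (w1.length - (w2.length - i)))) := by
  obtain ⟨-, hp2, hp3, hp4⟩ := prefWhile_spec w1 w2 0 (Nat.zero_le _)
  obtain ⟨-, hs2, hs3, hs4⟩ := sufWhile_spec w1 w2 0 (Nat.zero_le _)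
  set p := prefWhile w1 w2 0 with hp
  set e := sufWhile w1 w2 0 with he
  by_cases h : w2.length ≤ p + e
  · -- pick i = w2.length - e; then i ≤ p and w2.length - i ≤ e
    have : (List.range (w2.length + 1)).any (fun i =>
        (w2.take i == w1.take i) && (w2.drop i == w1.drop (w1.length - (w2.length - i)))) = true := by
      rw [List.any_eq_true]
      refine ⟨w2.length - e, List.mem_range.mpr (by omega), ?_⟩
      rw [Bool.and_eq_true, beq_iff_eq, beq_iff_eq]
      constructor
      · rw [take_eq_iff w1 w2 _ (by omega) hle]
        intro j hj
        exact (hp3 j (Nat.zero_le _) (by omega)).symm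
      · rw [drop_eq_iff w1 w2 _ (by omega) hle]
        intro t ht
        exact hs3 t (Nat.zero_le _) (by omega)
    rw [this, decide_eq_true h]
  · -- no split point works: any i ≤ p with w2.length - i ≤ e would give w2.length ≤ p + e
    have : (List.range (w2.length + 1)).any (fun i =>
        (w2.take i == w1.take i) && (w2.drop i == w1.drop (w1.length - (w2.length - i)))) = false := by
      rw [List.any_eq_false]
      intro i hi
      have hi' : i ≤ w2.length := by have := List.mem_range.mp hi; omega
      rw [Bool.and_eq_true, beq_iff_eq, beq_iff_eq,
        take_eq_iff w1 w2 _ hi' hle, drop_eq_iff w1 w2 _ hi' hle]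
      rintro ⟨h1, h2⟩
      -- from h1: i ≤ p (else mismatch at p < i contradicts h1 p)
      have hip : i ≤ p := by
        by_contra hc
        have hpl : p < w2.length := by omega
        exact (hp4 hpl) ((h1 p (by omega)).symm)
      -- from h2: w2.length - i ≤ e (else mismatch at t = e)
      have hie : w2.length - i ≤ e := by
        by_contra hc
        have hel : e < w2.length := by omega
        exact (hs4 hel) (h2 e (by omega))
      omega
    rw [this, decide_eq_false h]

-- ===== VERDICT (by name: the statement is the Claim_ definition above) =====
theorem solution_spec : Claim_equal_solution := by
  intro s1 s2 _
  unfold Spec_solution solution solution_alt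
  by_cases h : (PySem.Str.split₀ s1).length < (PySem.Str.split₀ s2).length
  · simp only [if_pos h]
    exact core _ _ (le_of_lt h)
  · simp only [if_neg h]
    exact core _ _ (by omega)
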